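-- pv_equiv track=rewrite | github.com/Thitkorn76/PythonClass | Lecture01/testgit.py/EXERCISE.py/ex.py | count_characters_and_english_vowels
-- ===== SOURCE A (Python) =====
-- def count_characters_and_english_vowels(input_string):
--
--     char_count = 0
--     vowel_count = 0
--
--
--     english_vowels = "aeiouAEIOU"
--
--     for char in input_string:
--         if char.isalpha():
--             char_count += 1
--             if char in english_vowels:
--                 vowel_count += 1
--                 char_count -=1
--
--     return char_count, vowel_count
-- ===== SOURCE B (Python) =====
-- def count_characters_and_english_vowels(input_string):
--     vowels = "aeiouAEIOU"
--     total_letters = sum(1 for ch in input_string if ch.isalpha())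
--     vowel_count = sum(1 for ch in input_string if ch in vowels)
--     return total_letters - vowel_count, vowel_count
-- ===== Notes on version B (the rewrite author's own statement) =====
-- stated objective: simpler
-- what changed: B replaces A's single stateful loop with increment-then-cancel bookkeeping by two independent counts (letters via isalpha, vowels via membership) and derives the consonant count by subtraction.
import Mathlib
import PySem

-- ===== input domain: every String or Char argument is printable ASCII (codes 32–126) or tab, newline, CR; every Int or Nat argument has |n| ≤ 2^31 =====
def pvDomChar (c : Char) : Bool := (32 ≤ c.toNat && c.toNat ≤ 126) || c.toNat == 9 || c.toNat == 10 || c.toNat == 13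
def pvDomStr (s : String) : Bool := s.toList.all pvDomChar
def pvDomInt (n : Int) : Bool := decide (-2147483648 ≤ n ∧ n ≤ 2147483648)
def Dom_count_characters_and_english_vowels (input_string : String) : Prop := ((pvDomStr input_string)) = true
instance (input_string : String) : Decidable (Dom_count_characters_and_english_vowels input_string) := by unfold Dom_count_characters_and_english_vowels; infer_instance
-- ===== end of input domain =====

-- B computes total-letter and vowel counts independently and returns consonants by subtraction,
-- replacing A's increment-then-cancel loop (objective: simpler).


-- ===== PORT A =====
def count_characters_and_english_vowels (input_string : String) : Int × Int :=
  input_string.toList.foldl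
    (fun (acc : Int × Int) (char : Char) =>
      if PySem.Chars.isalpha char then
        let char_count := acc.1 + 1
        if ("aeiouAEIOU".toList).contains char then
          (char_count - 1, acc.2 + 1)
        else
          (char_count, acc.2)
      else acc)
    (0, 0)

-- ===== PORT B =====
def count_characters_and_english_vowels_alt (input_string : String) : Int × Int :=
  let total_letters : Int := input_string.toList.countP (fun ch => PySem.Chars.isalpha ch)
  let vowel_count : Int := input_string.toList.countP (fun ch => ("aeiouAEIOU".toList).contains ch)
  (total_letters - vowel_count, vowel_count)

-- ===== PRECONDITION & SPEC =====
def Spec_count_characters_and_english_vowels (input_string : String) (out : Int × Int) : Prop := out = count_characters_and_english_vowels_alt input_string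
instance (input_string : String) (out : Int × Int) : Decidable (Spec_count_characters_and_english_vowels input_string out) := by unfold Spec_count_characters_and_english_vowels; infer_instance

-- ===== CLAIM (what is proved, stated in full; the proofs are below) =====
def Claim_equal_count_characters_and_english_vowels : Prop := ∀ (input_string : String), Dom_count_characters_and_english_vowels input_string → Spec_count_characters_and_english_vowels input_string (count_characters_and_english_vowels input_string)

-- ===== LEMMAS AND PROOFS =====

-- every ASCII vowel is a letter
lemma vowels_toList : "aeiouAEIOU".toList = ['a','e','i','o','u','A','E','I','O','U'] := rfl

lemma vowel_isalpha (c : Char) (h : ("aeiouAEIOU".toList).contains c = true) :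
    PySem.Chars.isalpha c = true := by
  rw [vowels_toList] at h
  have hm : c ∈ (['a','e','i','o','u','A','E','I','O','U'] : List Char) := by
    simpa using h
  fin_cases hm <;> decide

lemma foldl_loop_eq (cs : List Char) (c v : Int) :
    cs.foldl
      (fun (acc : Int × Int) (char : Char) =>
        if PySem.Chars.isalpha char then
          let char_count := acc.1 + 1
          if ("aeiouAEIOU".toList).contains char then
            (char_count - 1, acc.2 + 1)
          else
            (char_count, acc.2)
        else acc)
      (c, v)
    = (c + (cs.countP (fun ch => PySem.Chars.isalpha ch) : Int)
         - (cs.countP (fun ch => ("aeiouAEIOU".toList).contains ch) : Int),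
       v + (cs.countP (fun ch => ("aeiouAEIOU".toList).contains ch) : Int)) := by
  induction cs generalizing c v with
  | nil => simp
  | cons hd tl ih =>
    by_cases hv : ("aeiouAEIOU".toList).contains hd = true
    · have ha := vowel_isalpha hd hv
      simp only [List.foldl_cons, List.countP_cons, ha, hv, if_true]
      rw [ih]
      push_cast
      refine Prod.ext ?_ ?_ <;> · simp; try (push_cast; ring)
    · by_cases ha : PySem.Chars.isalpha hd = true
      · simp only [List.foldl_cons, List.countP_cons, ha, hv, if_true, if_false]
        rw [ih]
        push_cast [hv]
        refine Prod.ext ?_ ?_ <;> · simp; try (push_cast; ring)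
      · simp only [List.foldl_cons, List.countP_cons, ha, hv, if_false]
        rw [ih]
        push_cast [hv, ha]
        simp

-- ===== VERDICT (by name: the statement is the Claim_ definition above) =====
theorem count_characters_and_english_vowels_spec : Claim_equal_count_characters_and_english_vowels := by
  intro s _
  unfold Spec_count_characters_and_english_vowels count_characters_and_english_vowels count_characters_and_english_vowels_alt
  rw [foldl_loop_eq]
  refine Prod.ext ?_ ?_ <;> · simp; try (push_cast; ring)
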